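-- pv_equiv track=rewrite | github.com/attmous/yoyocore | yoyopy/voice/devices.py | format_device_label
-- ===== SOURCE A (Python) =====
-- def _normalize_alsa_selector(value: str) -> str:
--     raw = value.strip()
--     if raw.upper().startswith("ALSA:"):
--         raw = raw.split(":", 1)[1].strip()
--     return raw
--
-- def format_device_label(device_id: str | None) -> str:
--     """Turn an ALSA selector into a compact label suitable for the 240px UI."""
--
--     if not device_id:
--         return "Auto"
--
--     normalized = _normalize_alsa_selector(device_id)
--
--     # If the selector is of the form "<route>:CARD=XYZ,DEV=0", prefer showing the
--     # card (and dev) with a route suffix. This reads much better than raw ALSA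
--     # strings like "iec958:CARD=SE,DEV=0".
--     route = ""
--     spec = normalized
--     if ":" in normalized:
--         route, spec = normalized.split(":", 1)
--         route = route.strip()
--         spec = spec.strip()
--
--     card = ""
--     dev = ""
--     upper_spec = spec.upper()
--     if "CARD=" in upper_spec:
--         start = upper_spec.index("CARD=") + len("CARD=")
--         end = spec.find(",", start)
--         card = spec[start:] if end == -1 else spec[start:end]
--         card = card.strip()
--     if "DEV=" in upper_spec:
--         start = upper_spec.index("DEV=") + len("DEV=")
--         end = spec.find(",", start)
--         dev = spec[start:] if end == -1 else spec[start:end]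
--         dev = dev.strip()
--
--     if card:
--         label = card
--         if route:
--             label = f"{label} {route}"
--         if dev:
--             label = f"{label} {dev}"
--         label = label.strip()
--         if len(label) > 18:
--             return label[:17] + "..."
--         return label
--
--     # Keep the full selector for power users, but avoid noisy prefixes.
--     for prefix in (
--         "default:",
--         "sysdefault:",
--         "plughw:",
--         "front:",
--         "dsnoop:",
--         "dmix:",
--         "hw:",
--         "iec958:",
--         "hdmi:",
--     ):
--         if normalized.lower().startswith(prefix):
--             normalized = normalized[len(prefix) :]
--             break
--
--     normalized = normalized.strip()
--     if not normalized:
--         return "Auto"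
--
--     if len(normalized) > 18:
--         return normalized[:17] + "..."
--     return normalized
-- ===== SOURCE B (Python) =====
-- _PREFIXES = ("default:", "sysdefault:", "plughw:", "front:", "dsnoop:", "dmix:", "hw:", "iec958:", "hdmi:")
--
-- def _normalize(value):
--     raw = value.strip()
--     if raw.upper().startswith("ALSA:"):
--         raw = raw.split(":", 1)[1].strip()
--     return raw
--
-- def _clip(label):
--     return label[:17] + "..." if len(label) > 18 else label
--
-- def _field(spec, key):
--     # parse the spec as comma-separated fields and scan them
--     for part in spec.split(","):
--         i = part.upper().find(key)
--         if i != -1: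
--             return part[i + len(key):].strip()
--     return ""
--
-- def format_device_label(device_id):
--     if not device_id:
--         return "Auto"
--     normalized = _normalize(device_id)
--     route, spec = "", normalized
--     if ":" in normalized:
--         route, spec = (piece.strip() for piece in normalized.split(":", 1))
--     card = _field(spec, "CARD=")
--     dev = _field(spec, "DEV=")
--     if card:
--         return _clip(" ".join(w for w in (card, route, dev) if w))
--     prefix = next((p for p in _PREFIXES if normalized.lower().startswith(p)), "")
--     rest = normalized[len(prefix):].strip()
--     return _clip(rest) if rest else "Auto"
-- ===== Notes on version B (the rewrite author's own statement) =====
-- stated objective: idiomatic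
-- what changed: Replaces A's hand-rolled index/find substring slicing for CARD=/DEV= with a comma-split field scan, builds the label with a join over the non-empty pieces instead of incremental concatenation+strip, and picks the noisy prefix with next() over the prefix tuple instead of a break-loop.
import Mathlib
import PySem

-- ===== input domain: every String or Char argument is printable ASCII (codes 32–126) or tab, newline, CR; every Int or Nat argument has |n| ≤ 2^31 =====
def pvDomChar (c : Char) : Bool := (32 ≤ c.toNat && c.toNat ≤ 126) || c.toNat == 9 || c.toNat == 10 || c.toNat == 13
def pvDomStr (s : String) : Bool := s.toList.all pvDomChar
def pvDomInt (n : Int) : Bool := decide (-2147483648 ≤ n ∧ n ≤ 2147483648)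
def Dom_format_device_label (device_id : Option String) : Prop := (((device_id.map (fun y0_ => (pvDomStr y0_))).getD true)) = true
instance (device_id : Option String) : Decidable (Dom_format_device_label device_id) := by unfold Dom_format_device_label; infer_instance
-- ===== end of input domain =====

-- B re-parses the CARD=/DEV= fields by a comma-split scan, joins the non-empty label pieces,
-- and picks the noisy prefix with a find-first instead of a break-loop (objective: idiomatic; same cost).


-- ===== PORT A =====
-- shared with port B (the two Pythons share this helper verbatim): _normalize_alsa_selector
-- raw.split(":", 1)[1] is ported via PySem.Chars.splitMax? (getD covers the impossible missing-piece case: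
-- the guard guarantees ':' ∈ raw, so split(":",1) has two pieces)
def pvNorm (v : List Char) : List Char :=
  let raw := PySem.Chars.strip v
  if PySem.Chars.startswith (PySem.Chars.upper raw) ("ALSA:".toList) then
    PySem.Chars.strip (((PySem.Chars.splitMax? raw (":".toList) 1).getD []).getD 1 [])
  else raw

-- shared route/spec split: route, spec = normalized.split(":", 1) each stripped (identical lines in both Pythons)
def pvRouteSpec (n : List Char) : List Char × List Char :=
  if PySem.Chars.isIn (":".toList) n then
    let parts := (PySem.Chars.splitMax? n (":".toList) 1).getD []
    (PySem.Chars.strip (parts.getD 0 []), PySem.Chars.strip (parts.getD 1 []))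
  else ([], n)

-- A's field extraction: membership test on upper_spec, index, find(",", start), slice
def pvFieldA (spec key : List Char) : List Char :=
  let u := PySem.Chars.upper spec
  if PySem.Chars.isIn key u then
    let start := PySem.Chars.find u key + key.length
    let e := PySem.Chars.findFrom spec (",".toList) start
    PySem.Chars.strip (if e = -1 then PySem.Chars.slice spec (some start) none
                       else PySem.Chars.slice spec (some start) (some e))
  else []

def pvPrefixes : List (List Char) :=
  ["default:".toList, "sysdefault:".toList, "plughw:".toList, "front:".toList,
   "dsnoop:".toList, "dmix:".toList, "hw:".toList, "iec958:".toList, "hdmi:".toList]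

-- A's for-loop over the prefix tuple with break
def pvStripPrefixLoopA : List (List Char) → List Char → List Char
  | [], n => n
  | p :: ps, n =>
    if PySem.Chars.startswith (PySem.Chars.lower n) p then PySem.Chars.slice n (some (p.length : Int)) none
    else pvStripPrefixLoopA ps n

def format_device_label (device_id : Option String) : String :=
  match device_id with
  | none => "Auto"
  | some s =>
    if s.toList = [] then "Auto"
    else
      let normalized := pvNorm s.toList
      let rs := pvRouteSpec normalized
      let card := pvFieldA rs.2 ("CARD=".toList)
      let dev := pvFieldA rs.2 ("DEV=".toList)
      if card ≠ [] then
        let l2 := if rs.1 ≠ [] then card ++ " ".toList ++ rs.1 else card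
        let l3 := if dev ≠ [] then l2 ++ " ".toList ++ dev else l2
        let label := PySem.Chars.strip l3
        if 18 < label.length then String.ofList (PySem.Chars.slice label none (some 17) ++ "...".toList)
        else String.ofList label
      else
        let n2 := pvStripPrefixLoopA pvPrefixes normalized
        let n3 := PySem.Chars.strip n2
        if n3 = [] then "Auto"
        else if 18 < n3.length then String.ofList (PySem.Chars.slice n3 none (some 17) ++ "...".toList)
        else String.ofList n3

-- ===== PORT B =====
-- B's _field: scan the comma-split parts (spec.split(",") is List.splitOn ',' — Python's str.split with a
-- one-char separator keeps empty pieces, exactly List.splitOn)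
def pvScanParts (key : List Char) : List (List Char) → List Char
  | [] => []
  | p :: ps =>
    let i := PySem.Chars.find (PySem.Chars.upper p) key
    if i ≠ -1 then PySem.Chars.strip (PySem.Chars.slice p (some (i + key.length)) none)
    else pvScanParts key ps

def pvFieldB (spec key : List Char) : List Char := pvScanParts key (List.splitOn ',' spec)

-- B's _clip helper
def pvClipB (l : List Char) : String :=
  if 18 < l.length then String.ofList (PySem.Chars.slice l none (some 17) ++ "...".toList)
  else String.ofList l

def format_device_label_alt (device_id : Option String) : String :=
  match device_id with
  | none => "Auto"
  | some s =>
    if s.toList = [] then "Auto"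
    else
      let normalized := pvNorm s.toList
      let rs := pvRouteSpec normalized
      let card := pvFieldB rs.2 ("CARD=".toList)
      let dev := pvFieldB rs.2 ("DEV=".toList)
      if card ≠ [] then
        pvClipB (PySem.Chars.join (" ".toList) (List.filter (fun w => !w.isEmpty) [card, rs.1, dev]))
      else
        let pref := (pvPrefixes.find? (fun p => PySem.Chars.startswith (PySem.Chars.lower normalized) p)).getD []
        let rest := PySem.Chars.strip (PySem.Chars.slice normalized (some (pref.length : Int)) none)
        if rest = [] then "Auto" else pvClipB rest

-- ===== PRECONDITION & SPEC =====
def Spec_format_device_label (device_id : Option String) (out : String) : Prop := out = format_device_label_alt device_id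
instance (device_id : Option String) (out : String) : Decidable (Spec_format_device_label device_id out) := by unfold Spec_format_device_label; infer_instance

-- ===== CLAIM (what is proved, stated in full; the proofs are below) =====
def Claim_equal_format_device_label : Prop := ∀ (device_id : Option String), Dom_format_device_label device_id → Spec_format_device_label device_id (format_device_label device_id)

-- ===== LEMMAS AND PROOFS =====


theorem pv_find_eq_of {s sub : List Char} {k : Nat} (h1 : sub <+: s.drop k)
    (h2 : ∀ i < k, ¬ sub <+: s.drop i) : PySem.Chars.find s sub = (k : Int) := by
  have hinf : sub <:+: s := h1.isInfix.trans (List.drop_suffix k s).isInfix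
  have hnn : 0 ≤ PySem.Chars.find s sub := (PySem.Chars.find_nonneg_iff s sub).mpr hinf
  obtain ⟨hp, hmin⟩ := PySem.Chars.find_spec hnn
  have : (PySem.Chars.find s sub).toNat = k := by
    rcases lt_trichotomy (PySem.Chars.find s sub).toNat k with h | h | h
    · exact absurd hp (h2 _ h)
    · exact h
    · exact absurd h1 (hmin _ h)
  omega

theorem pv_singleton_prefix_iff (c : Char) (w : List Char) : [c] <+: w ↔ w[0]? = some c := by
  cases w with
  | nil => simp
  | cons a t => simp [List.cons_prefix_cons]; exact eq_comm

theorem pv_find_comma (x y : List Char) (hx : ',' ∉ x) :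
    PySem.Chars.find (x ++ ',' :: y) [','] = (x.length : Int) := by
  apply pv_find_eq_of
  · rw [List.drop_left]
    exact ⟨y, rfl⟩
  · intro i hi hp
    rw [pv_singleton_prefix_iff, List.getElem?_drop, Nat.add_zero,
      List.getElem?_append_left (by omega)] at hp
    exact hx (List.mem_of_getElem? hp)

theorem pv_prefix_append_of_le {sub u Y : List Char} (h : sub <+: u ++ Y) (hl : sub.length ≤ u.length) :
    sub <+: u := by
  rw [List.prefix_iff_eq_take] at h ⊢
  rwa [List.take_append_of_le_length hl] at h

theorem pv_find_append_of_found (X Y sub : List Char) (h : PySem.Chars.find X sub ≠ -1) :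
    PySem.Chars.find (X ++ Y) sub = PySem.Chars.find X sub := by
  have hnn : 0 ≤ PySem.Chars.find X sub := by
    have := PySem.Chars.neg_one_le_find X sub; omega
  obtain ⟨hp, hmin⟩ := PySem.Chars.find_spec hnn
  have hle : (PySem.Chars.find X sub).toNat ≤ X.length := by
    have := PySem.Chars.find_le_length X sub; omega
  have hsl : sub.length ≤ X.length - (PySem.Chars.find X sub).toNat := by
    have := hp.length_le; simp at this; omega
  have : PySem.Chars.find (X ++ Y) sub = ((PySem.Chars.find X sub).toNat : Int) := by
    apply pv_find_eq_of
    · rw [List.drop_append_of_le_length hle]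
      exact hp.trans (List.prefix_append _ _)
    · intro j hj hc
      rw [List.drop_append_of_le_length (by omega)] at hc
      exact hmin j hj (pv_prefix_append_of_le hc (by simp; omega))
  omega

theorem pv_drop_append_comma (a b : List Char) (t : Nat) :
    (a ++ ',' :: b).drop (a.length + 1 + t) = b.drop t := by
  have h1 : (a ++ ',' :: b).drop (a.length + 1) = b := by
    rw [show a ++ ',' :: b = (a ++ [',']) ++ b by simp,
      show a.length + 1 = (a ++ [',']).length by simp, List.drop_left]
  rw [← List.drop_drop, h1]

theorem pv_no_occ_left {a b sub : List Char} (hnc : ',' ∉ sub)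
    (h : PySem.Chars.find a sub = -1) :
    ∀ j ≤ a.length, ¬ sub <+: (a ++ ',' :: b).drop j := by
  intro j hj hc
  rw [List.drop_append_of_le_length hj] at hc
  by_cases hlen : sub.length ≤ (a.drop j).length
  · have hpre : sub <+: a.drop j := pv_prefix_append_of_le hc hlen
    have : sub <:+: a := hpre.isInfix.trans (List.drop_suffix j a).isInfix
    rw [PySem.Chars.find_eq_neg_one_iff] at h
    exact h this
  · simp at hlen
    have ht : a.length - j < sub.length := by omega
    have := hc.getElem ht
    rw [List.getElem_append_right (by simp)] at this
    simp at this
    exact hnc (this ▸ List.getElem_mem ht)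

theorem pv_find_append_comma_of_not_found (a b sub : List Char) (hnc : ',' ∉ sub)
    (h : PySem.Chars.find a sub = -1) :
    PySem.Chars.find (a ++ ',' :: b) sub =
      if PySem.Chars.find b sub = -1 then -1 else ((a.length : Int) + 1) + PySem.Chars.find b sub := by
  by_cases hb : PySem.Chars.find b sub = -1
  · rw [if_pos hb, PySem.Chars.find_eq_neg_one_iff]
    intro hinf
    have : ∃ j, sub <+: (a ++ ',' :: b).drop j := by
      rw [PySem.Chars.exists_prefix_drop_iff_isIn, PySem.Chars.isIn_iff_infix]
      exact hinf
    obtain ⟨j, hj⟩ := this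
    by_cases hcase : j ≤ a.length
    · exact pv_no_occ_left hnc h j hcase hj
    · have ⟨t, ht⟩ : ∃ t, j = a.length + 1 + t := ⟨j - (a.length + 1), by omega⟩
      rw [ht, pv_drop_append_comma] at hj
      rw [PySem.Chars.find_eq_neg_one_iff] at hb
      exact hb (hj.isInfix.trans (List.drop_suffix t b).isInfix)
  · rw [if_neg hb]
    have hnnb : 0 ≤ PySem.Chars.find b sub := by
      have := PySem.Chars.neg_one_le_find b sub; omega
    obtain ⟨hp, hmin⟩ := PySem.Chars.find_spec hnnb
    have : PySem.Chars.find (a ++ ',' :: b) sub = ((a.length + 1 + (PySem.Chars.find b sub).toNat : Nat) : Int) := by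
      apply pv_find_eq_of
      · rw [pv_drop_append_comma]; exact hp
      · intro j hj hc
        by_cases hcase : j ≤ a.length
        · exact pv_no_occ_left hnc h j hcase hc
        · have ⟨t, ht⟩ : ∃ t, j = a.length + 1 + t := ⟨j - (a.length + 1), by omega⟩
          rw [ht, pv_drop_append_comma] at hc
          exact hmin t (by omega) hc
    omega

theorem pv_first_comma {spec : List Char} (h : ',' ∈ spec) :
    ∃ a b, spec = a ++ ',' :: b ∧ ',' ∉ a := by
  induction spec with
  | nil => cases h
  | cons c t ih =>
    by_cases hc : c = ','
    · exact ⟨[], t, by simp [hc], by simp⟩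
    · obtain ⟨a, b, h1, h2⟩ := ih (by rcases List.mem_cons.mp h with h' | h' <;> [exact absurd h'.symm hc; exact h'])
      exact ⟨c :: a, b, by simp [h1], by simp [h2]; exact fun hcc => hc hcc.symm⟩

theorem pv_occ_bound {u key : List Char} (h : PySem.Chars.find u key ≠ -1) :
    (PySem.Chars.find u key).toNat + key.length ≤ u.length := by
  have hnn : 0 ≤ PySem.Chars.find u key := by have := PySem.Chars.neg_one_le_find u key; omega
  obtain ⟨hp, -⟩ := PySem.Chars.find_spec hnn
  have := hp.length_le
  simp at this
  have := PySem.Chars.find_le_length u key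
  omega

theorem pv_upper_append_comma (a b : List Char) :
    PySem.Chars.upper (a ++ ',' :: b) = PySem.Chars.upper a ++ ',' :: PySem.Chars.upper b := by
  have h : PySem.Chars.upperChar ',' = ',' := by decide
  simp [PySem.Chars.upper, h]

theorem pv_len_upper (s : List Char) : (PySem.Chars.upper s).length = s.length := by
  simp [PySem.Chars.upper]

def pvCore (spec key : List Char) : List Char :=
  if PySem.Chars.find (PySem.Chars.upper spec) key = -1 then []
  else
    PySem.Chars.strip
      (if PySem.Chars.find (spec.drop ((PySem.Chars.find (PySem.Chars.upper spec) key).toNat + key.length)) [','] = -1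
       then spec.drop ((PySem.Chars.find (PySem.Chars.upper spec) key).toNat + key.length)
       else (spec.drop ((PySem.Chars.find (PySem.Chars.upper spec) key).toNat + key.length)).take
          (PySem.Chars.find (spec.drop ((PySem.Chars.find (PySem.Chars.upper spec) key).toNat + key.length)) [',']).toNat)

theorem pv_fieldA_eq_core (spec key : List Char) : pvFieldA spec key = pvCore spec key := by
  by_cases hf : PySem.Chars.find (PySem.Chars.upper spec) key = -1
  · simp [pvFieldA, pvCore, PySem.Chars.isIn, hf]
  · have hnn : 0 ≤ PySem.Chars.find (PySem.Chars.upper spec) key := by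
      have := PySem.Chars.neg_one_le_find (PySem.Chars.upper spec) key; omega
    have hk : (PySem.Chars.find (PySem.Chars.upper spec) key).toNat + key.length ≤ spec.length := by
      have := pv_occ_bound hf; rwa [pv_len_upper] at this
    have hcast : PySem.Chars.find (PySem.Chars.upper spec) key + key.length
        = (((PySem.Chars.find (PySem.Chars.upper spec) key).toNat + key.length : Nat) : Int) := by
      push_cast; omega
    have he := PySem.Chars.findFrom_natCast spec [','] _ hk
    simp only [pvFieldA, pvCore, PySem.Chars.isIn, hf, bne_iff_ne, ne_eq, not_false_iff, if_true,
      show (",".toList) = [','] from rfl]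
    rw [hcast, he]
    set k := (PySem.Chars.find (PySem.Chars.upper spec) key).toNat + key.length with hkdef
    by_cases hr : PySem.Chars.find (spec.drop k) [','] = -1
    · simp only [hr, if_true]
      simp [PySem.List.slice_from]
    · have hrnn : 0 ≤ PySem.Chars.find (spec.drop k) [','] := by
        have := PySem.Chars.neg_one_le_find (spec.drop k) [',']; omega
      simp only [hr, if_false]
      rw [if_neg (by omega)]
      have hc2 : (k : Int) + PySem.Chars.find (spec.drop k) [',']
          = ((k + (PySem.Chars.find (spec.drop k) [',']).toNat : Nat) : Int) := by push_cast; omega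
      rw [hc2]
      simp only [PySem.Chars.slice_eq_listSlice, PySem.List.slice_natCast]
      rw [Nat.add_sub_cancel_left]

theorem pv_scan_found {p : List Char} (key : List Char) (ps : List (List Char))
    (hf : PySem.Chars.find (PySem.Chars.upper p) key ≠ -1) :
    pvScanParts key (p :: ps)
      = PySem.Chars.strip (p.drop ((PySem.Chars.find (PySem.Chars.upper p) key).toNat + key.length)) := by
  have hnn : 0 ≤ PySem.Chars.find (PySem.Chars.upper p) key := by
    have := PySem.Chars.neg_one_le_find (PySem.Chars.upper p) key; omega
  have hcast : PySem.Chars.find (PySem.Chars.upper p) key + (key.length : Int)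
      = (((PySem.Chars.find (PySem.Chars.upper p) key).toNat + key.length : Nat) : Int) := by
    push_cast; omega
  simp only [pvScanParts, ne_eq, hf, not_false_iff, if_true]
  rw [PySem.Chars.slice_eq_listSlice, PySem.List.slice_from p (by omega)]
  rw [show (PySem.Chars.find (PySem.Chars.upper p) key + (key.length : Int)).toNat
      = (PySem.Chars.find (PySem.Chars.upper p) key).toNat + key.length from by omega]

theorem pv_scan_notfound {p : List Char} (key : List Char) (ps : List (List Char))
    (hf : PySem.Chars.find (PySem.Chars.upper p) key = -1) :
    pvScanParts key (p :: ps) = pvScanParts key ps := by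
  simp [pvScanParts, hf]

theorem pv_field_eq (key : List Char) (hne : key ≠ []) (hnc : ',' ∉ key) :
    ∀ spec, pvFieldA spec key = pvFieldB spec key := by
  suffices H : ∀ n (spec : List Char), spec.length ≤ n → pvCore spec key = pvFieldB spec key by
    intro spec; rw [pv_fieldA_eq_core]; exact H spec.length spec le_rfl
  intro n
  induction n with
  | zero =>
    intro spec hlen
    have hnil : spec = [] := List.eq_nil_of_length_eq_zero (Nat.le_zero.mp hlen)
    subst hnil
    have hfind : PySem.Chars.find ([] : List Char) key = -1 := by
      rw [PySem.Chars.find_eq_neg_one_iff]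
      intro h
      exact hne (List.eq_nil_of_infix_nil h ▸ rfl)
    simp [pvCore, pvFieldB, PySem.Chars.upper, hfind, List.splitOn, List.splitOnP_nil,
      pvScanParts]
  | succ m ih =>
    intro spec hlen
    by_cases hmem : ',' ∈ spec
    · obtain ⟨a, b, rfl, hna⟩ := pv_first_comma hmem
      have hsplit : List.splitOn ',' (a ++ ',' :: b) = a :: List.splitOn ',' b :=
        List.splitOnP_first _ a (by intro x hx; simp; rintro rfl; exact hna hx) ',' (by simp) b
      have hlb : b.length ≤ m := by simp at hlen; omega
      have hupper := pv_upper_append_comma a b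
      by_cases hfa : PySem.Chars.find (PySem.Chars.upper a) key = -1
      · -- key not in the first part: both sides move on to b
        have hB : pvFieldB (a ++ ',' :: b) key = pvFieldB b key := by
          unfold pvFieldB
          rw [hsplit, pv_scan_notfound key _ hfa]
        rw [hB, ← ih b hlb]
        have hfind := pv_find_append_comma_of_not_found (PySem.Chars.upper a) (PySem.Chars.upper b) key hnc hfa
        by_cases hfb : PySem.Chars.find (PySem.Chars.upper b) key = -1
        · rw [if_pos hfb] at hfind
          simp [pvCore, hupper, hfind, hfb]
        · rw [if_neg hfb] at hfind
          have hnn : 0 ≤ PySem.Chars.find (PySem.Chars.upper b) key := by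
            have := PySem.Chars.neg_one_le_find (PySem.Chars.upper b) key; omega
          have hfind' : PySem.Chars.find (PySem.Chars.upper (a ++ ',' :: b)) key
              = ((PySem.Chars.upper a).length : Int) + 1 + PySem.Chars.find (PySem.Chars.upper b) key := by
            rw [hupper]; exact hfind
          have hne2 : PySem.Chars.find (PySem.Chars.upper (a ++ ',' :: b)) key ≠ -1 := by
            rw [hfind']; omega
          have htoNat : (PySem.Chars.find (PySem.Chars.upper (a ++ ',' :: b)) key).toNat + key.length
              = a.length + 1 + ((PySem.Chars.find (PySem.Chars.upper b) key).toNat + key.length) := by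
            rw [hfind', pv_len_upper]; omega
          unfold pvCore
          rw [if_neg hne2, if_neg hfb, htoNat, pv_drop_append_comma]
      · -- key found in the first part
        have i_nn : 0 ≤ PySem.Chars.find (PySem.Chars.upper a) key := by
          have := PySem.Chars.neg_one_le_find (PySem.Chars.upper a) key; omega
        have hbound : (PySem.Chars.find (PySem.Chars.upper a) key).toNat + key.length ≤ a.length := by
          have := pv_occ_bound hfa; rwa [pv_len_upper] at this
        set k := (PySem.Chars.find (PySem.Chars.upper a) key).toNat + key.length with hkdef
        have hB : pvFieldB (a ++ ',' :: b) key = PySem.Chars.strip (a.drop k) := by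
          unfold pvFieldB
          rw [hsplit, pv_scan_found key _ hfa]
        rw [hB]
        have hfind : PySem.Chars.find (PySem.Chars.upper (a ++ ',' :: b)) key
            = PySem.Chars.find (PySem.Chars.upper a) key := by
          rw [hupper]
          exact pv_find_append_of_found _ _ _ hfa
        have hne2 : PySem.Chars.find (PySem.Chars.upper (a ++ ',' :: b)) key ≠ -1 := by
          rw [hfind]; exact hfa
        have hdrop : (a ++ ',' :: b).drop k = a.drop k ++ ',' :: b :=
          List.drop_append_of_le_length hbound
        have hcfind : PySem.Chars.find ((a ++ ',' :: b).drop k) [','] = ((a.drop k).length : Int) := by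
          rw [hdrop]
          exact pv_find_comma _ _ (fun hmm => hna (List.mem_of_mem_drop hmm))
        have hrne : PySem.Chars.find ((a ++ ',' :: b).drop k) [','] ≠ -1 := by
          rw [hcfind]; omega
        unfold pvCore
        rw [if_neg hne2]
        simp only [hfind, ← hkdef]
        rw [if_neg hrne, hcfind]
        congr 1
        rw [hdrop]
        rw [show (((a.drop k).length : Int)).toNat = (a.drop k).length by omega]
        exact List.take_left
    · -- no comma in spec
      have hsplit : List.splitOn ',' spec = [spec] :=
        List.splitOnP_eq_single _ _ (by intro x hx; simp; rintro rfl; exact hmem hx)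
      by_cases hf : PySem.Chars.find (PySem.Chars.upper spec) key = -1
      · simp [pvCore, pvFieldB, hsplit, hf, pv_scan_notfound key _ hf, pvScanParts]
      · have hB : pvFieldB spec key
            = PySem.Chars.strip (spec.drop ((PySem.Chars.find (PySem.Chars.upper spec) key).toNat + key.length)) := by
          unfold pvFieldB
          rw [hsplit, pv_scan_found key _ hf]
        have hr : PySem.Chars.find (spec.drop ((PySem.Chars.find (PySem.Chars.upper spec) key).toNat + key.length)) [','] = -1 := by
          rw [PySem.Chars.find_eq_neg_one_iff, List.singleton_infix_iff]
          intro hcm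
          exact hmem (List.mem_of_mem_drop hcm)
        unfold pvCore
        rw [if_neg hf, hB]
        simp only [hr, if_true]


theorem pv_lstrip_of_strip {x : List Char} (hx : PySem.Chars.strip x = x) :
    PySem.Chars.lstrip x = x := by
  have h1 : (PySem.Chars.lstrip x).length ≤ x.length := by
    simp [PySem.Chars.lstrip]
    exact List.length_dropWhile_le _ _
  have h2 : (PySem.Chars.strip x).length ≤ (PySem.Chars.lstrip x).length := by
    simp [PySem.Chars.strip, PySem.Chars.rstrip]
    exact le_trans (List.length_dropWhile_le _ _) (by simp)
  have hlen : (PySem.Chars.lstrip x).length = x.length := by rw [hx] at h2; omega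
  exact List.IsSuffix.eq_of_length (by simp [PySem.Chars.lstrip]; exact List.dropWhile_suffix _) hlen

theorem pv_rstrip_of_strip {x : List Char} (hx : PySem.Chars.strip x = x) :
    PySem.Chars.rstrip x = x := by
  have hl := pv_lstrip_of_strip hx
  calc PySem.Chars.rstrip x = PySem.Chars.rstrip (PySem.Chars.lstrip x) := by rw [hl]
    _ = x := hx

theorem pv_head_not_space {x : List Char} (hx : PySem.Chars.lstrip x = x)
    (h0 : 0 < x.length) : ¬ PySem.Chars.isspace x[0] := by
  have := List.dropWhile_eq_self_iff.mp hx
  exact this h0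

theorem pv_lstrip_append {x r : List Char} (hx : PySem.Chars.lstrip x = x) (hne : x ≠ []) :
    PySem.Chars.lstrip (x ++ r) = x ++ r := by
  unfold PySem.Chars.lstrip
  rw [List.dropWhile_eq_self_iff]
  intro h0
  rw [List.getElem_append_left (by cases x <;> simp_all)]
  exact pv_head_not_space hx (by cases x <;> simp_all)

theorem pv_rstrip_append {l y : List Char} (hy : PySem.Chars.rstrip y = y) (hne : y ≠ []) :
    PySem.Chars.rstrip (l ++ y) = l ++ y := by
  unfold PySem.Chars.rstrip
  rw [List.reverse_append]
  have hry : List.dropWhile PySem.Chars.isspace y.reverse = y.reverse := by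
    have : (List.dropWhile PySem.Chars.isspace y.reverse).reverse = y := hy
    calc List.dropWhile PySem.Chars.isspace y.reverse
        = ((List.dropWhile PySem.Chars.isspace y.reverse).reverse).reverse := by simp
      _ = y.reverse := by rw [this]
  rw [show List.dropWhile PySem.Chars.isspace (y.reverse ++ l.reverse)
      = PySem.Chars.lstrip (y.reverse ++ l.reverse) from rfl]
  rw [pv_lstrip_append (x := y.reverse) (r := l.reverse) hry (by simpa using hne)]
  simp

theorem pv_strip_append (x y : List Char) (hx : PySem.Chars.strip x = x) (hxne : x ≠ [])
    (hy : PySem.Chars.strip y = y) (hyne : y ≠ []) :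
    PySem.Chars.strip (x ++ ' ' :: y) = x ++ ' ' :: y := by
  unfold PySem.Chars.strip
  rw [pv_lstrip_append (pv_lstrip_of_strip hx) hxne]
  rw [show x ++ ' ' :: y = (x ++ [' ']) ++ y from by simp]
  rw [pv_rstrip_append (pv_rstrip_of_strip hy) hyne]

theorem pv_dropWhile_idem (p : Char → Bool) (l : List Char) :
    List.dropWhile p (List.dropWhile p l) = List.dropWhile p l := by
  rw [List.dropWhile_eq_self_iff]
  intro h0
  have hne : List.dropWhile p l ≠ [] := by intro hc; rw [hc] at h0; simp at h0
  have := List.head_dropWhile_not (l := l) (p := p) hne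
  simpa [List.head_eq_getElem] using this

theorem pv_rstrip_idem (l : List Char) :
    PySem.Chars.rstrip (PySem.Chars.rstrip l) = PySem.Chars.rstrip l := by
  unfold PySem.Chars.rstrip
  simp [pv_dropWhile_idem]

theorem pv_strip_idem (s : List Char) :
    PySem.Chars.strip (PySem.Chars.strip s) = PySem.Chars.strip s := by
  have hl : PySem.Chars.lstrip (PySem.Chars.strip s) = PySem.Chars.strip s := by
    have hls : PySem.Chars.lstrip (PySem.Chars.lstrip s) = PySem.Chars.lstrip s := by
      simp [PySem.Chars.lstrip, pv_dropWhile_idem]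
    have hpre : PySem.Chars.strip s <+: PySem.Chars.lstrip s := by
      unfold PySem.Chars.strip PySem.Chars.rstrip
      rw [← List.reverse_suffix]
      simp [List.dropWhile_suffix]
    unfold PySem.Chars.lstrip
    rw [List.dropWhile_eq_self_iff]
    intro h0
    rw [hpre.getElem h0]
    have h0' : 0 < (PySem.Chars.lstrip s).length := by
      have := hpre.length_le; omega
    exact pv_head_not_space hls h0'
  calc PySem.Chars.strip (PySem.Chars.strip s)
      = PySem.Chars.rstrip (PySem.Chars.lstrip (PySem.Chars.strip s)) := rfl
    _ = PySem.Chars.rstrip (PySem.Chars.strip s) := by rw [hl]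
    _ = PySem.Chars.rstrip (PySem.Chars.rstrip (PySem.Chars.lstrip s)) := rfl
    _ = PySem.Chars.rstrip (PySem.Chars.lstrip s) := pv_rstrip_idem _

theorem pv_loop_eq (ps : List (List Char)) (n : List Char) :
    pvStripPrefixLoopA ps n =
      PySem.Chars.slice n (some ((((ps.find? (fun p => PySem.Chars.startswith (PySem.Chars.lower n) p)).getD []).length : Int))) none := by
  induction ps with
  | nil =>
    simp only [pvStripPrefixLoopA, List.find?_nil, Option.getD_none, List.length_nil]
    rw [PySem.Chars.slice_eq_listSlice, PySem.List.slice_from n (by omega)]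
    simp
  | cons p ps ih =>
    by_cases h : PySem.Chars.startswith (PySem.Chars.lower n) p
    · simp [pvStripPrefixLoopA, h, List.find?_cons_of_pos]
    · simp only [pvStripPrefixLoopA, h, if_false, Bool.false_eq_true]
      rw [List.find?_cons_of_neg (by simp [h])]
      exact ih

theorem pv_fieldA_stripped (spec key : List Char) :
    PySem.Chars.strip (pvFieldA spec key) = pvFieldA spec key := by
  by_cases h : PySem.Chars.isIn key (PySem.Chars.upper spec)
  · simp only [pvFieldA, h, if_true]
    exact pv_strip_idem _
  · simp only [pvFieldA, h, Bool.false_eq_true, if_false]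
    rfl

theorem pv_route_stripped (n : List Char) :
    PySem.Chars.strip (pvRouteSpec n).1 = (pvRouteSpec n).1 := by
  by_cases h : PySem.Chars.isIn (":".toList) n
  · simp only [pvRouteSpec, h, if_true]
    exact pv_strip_idem _
  · simp only [pvRouteSpec, h, Bool.false_eq_true, if_false]
    rfl

theorem pv_join1 (x : List Char) :
    PySem.Chars.join (" ".toList) (List.filter (fun w => !w.isEmpty) [x, [], []]) = x := by
  cases x with
  | nil => rfl
  | cons c t => simp [PySem.Chars.join, List.intercalate, List.filter]

theorem pv_join2 (x y : List Char) (hx : x ≠ []) (hy : y ≠ []) :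
    PySem.Chars.join (" ".toList) (List.filter (fun w => !w.isEmpty) [x, y, []])
      = x ++ " ".toList ++ y := by
  have h1 : (!x.isEmpty) = true := by simp [hx]
  have h2 : (!y.isEmpty) = true := by simp [hy]
  simp [List.filter, h1, h2, PySem.Chars.join, List.intercalate]

theorem pv_join2' (x y : List Char) (hx : x ≠ []) (hy : y ≠ []) :
    PySem.Chars.join (" ".toList) (List.filter (fun w => !w.isEmpty) [x, [], y])
      = x ++ " ".toList ++ y := by
  have h1 : (!x.isEmpty) = true := by simp [hx]
  have h2 : (!y.isEmpty) = true := by simp [hy]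
  simp [List.filter, h1, h2, PySem.Chars.join, List.intercalate]

theorem pv_join3 (x y z : List Char) (hx : x ≠ []) (hy : y ≠ []) (hz : z ≠ []) :
    PySem.Chars.join (" ".toList) (List.filter (fun w => !w.isEmpty) [x, y, z])
      = x ++ " ".toList ++ y ++ " ".toList ++ z := by
  have h1 : (!x.isEmpty) = true := by simp [hx]
  have h2 : (!y.isEmpty) = true := by simp [hy]
  have h3 : (!z.isEmpty) = true := by simp [hz]
  simp [List.filter, h1, h2, h3, PySem.Chars.join, List.intercalate]

theorem pv_strip_append' (x y : List Char) (hx : PySem.Chars.strip x = x) (hxne : x ≠ [])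
    (hy : PySem.Chars.strip y = y) (hyne : y ≠ []) :
    PySem.Chars.strip (x ++ " ".toList ++ y) = x ++ " ".toList ++ y := by
  rw [List.append_assoc]
  exact pv_strip_append x y hx hxne hy hyne

-- ===== VERDICT (by name: the statement is the Claim_ definition above) =====
theorem format_device_label_spec : Claim_equal_format_device_label := by
  intro device_id _
  unfold Spec_format_device_label
  cases device_id with
  | none => rfl
  | some s =>
    show format_device_label (some s) = format_device_label_alt (some s)
    unfold format_device_label format_device_label_alt
    by_cases hnil : s.toList = []
    · simp [hnil]
    · simp only [if_neg hnil]
      rw [pv_field_eq ("CARD=".toList) (by decide) (by decide),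
        pv_field_eq ("DEV=".toList) (by decide) (by decide)]
      set normalized := pvNorm s.toList with hnorm
      set rt := (pvRouteSpec normalized).1 with hrt
      set spec := (pvRouteSpec normalized).2 with hspec
      set card := pvFieldB spec ("CARD=".toList) with hcard
      set dev := pvFieldB spec ("DEV=".toList) with hdev
      have hcs : PySem.Chars.strip card = card := by
        rw [hcard, ← pv_field_eq _ (by decide) (by decide)]; exact pv_fieldA_stripped _ _
      have hds : PySem.Chars.strip dev = dev := by
        rw [hdev, ← pv_field_eq _ (by decide) (by decide)]; exact pv_fieldA_stripped _ _
      have hrs : PySem.Chars.strip rt = rt := by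
        rw [hrt]; exact pv_route_stripped _
      by_cases hc : card ≠ []
      · simp only [if_pos hc, pvClipB]
        have hlab : PySem.Chars.strip
            (if dev ≠ [] then (if rt ≠ [] then card ++ " ".toList ++ rt else card) ++ " ".toList ++ dev
             else (if rt ≠ [] then card ++ " ".toList ++ rt else card))
            = PySem.Chars.join (" ".toList) (List.filter (fun w => !w.isEmpty) [card, rt, dev]) := by
          by_cases hd : dev ≠ []
          · by_cases hr : rt ≠ []
            · rw [if_pos hd, if_pos hr, pv_join3 card rt dev hc hr hd]
              have hy := pv_strip_append' rt dev hrs hr hds hd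
              have hyne : rt ++ " ".toList ++ dev ≠ [] := by simp
              have hx := pv_strip_append' card (rt ++ " ".toList ++ dev) hcs hc hy hyne
              rw [show (card ++ " ".toList ++ rt) ++ " ".toList ++ dev
                  = card ++ " ".toList ++ (rt ++ " ".toList ++ dev) from by simp [List.append_assoc]]
              exact hx
            · have hr' : rt = [] := by simpa using hr
              rw [if_pos hd, if_neg hr, hr', pv_join2' card dev hc hd]
              exact pv_strip_append' card dev hcs hc hds hd
          · have hd' : dev = [] := by simpa using hd
            by_cases hr : rt ≠ []
            · rw [if_neg hd, if_pos hr, hd', pv_join2 card rt hc hr]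
              exact pv_strip_append' card rt hcs hc hrs hr
            · have hr' : rt = [] := by simpa using hr
              rw [if_neg hd, if_neg hr, hd', hr', pv_join1 card]
              exact hcs
        rw [hlab]
      · simp only [if_neg hc]
        rw [pv_loop_eq]
        rfl
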